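-- pv_equiv track=rewrite | github.com/Automation-of-diagnosis/diagnosis | webapp/gsc/funcs.py | sofa
-- ===== SOURCE A (Python) =====
-- from typing import Dict, List, Union
--
-- SOFA: Dict[str, Dict] = {'platelets': {'scale': [150, 100, 50, 20], 'direction': 'down'},
--                          'pao2_fio2': {'scale': [400, 300, 200, 100], 'direction': 'down'},
--                          'gsc': {'scale': [14, 12, 9, 6], 'direction': 'down'},
--                          'creatinine': {'scale': [110, 171, 300, 440], 'direction': 'up'},
--                          'bilirubin': {'scale': [20, 33, 102, 204], 'direction': 'up'},
--                          }
--
-- def sofa_direction(measure: int, scale: list, direction: str) -> int: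
--     """Function that counts points for SOFA"""
--     if direction == "up":
--         scale = list(scale[::-1])
--     for sofa_points, measure_border in enumerate(scale):
--         if measure > measure_border:
--             return 0 + sofa_points
--     return 4
--
-- def sofa(user_data: Dict[str, int]) -> Union[str, List[int]]:
--     """Function that counts the total points SOFA and in particular GSC"""
--     n = 0
--     gsc = 0
--     for measurement in user_data:
--         try:
--             user_data[measurement] = int(user_data[measurement])
--         except TypeError:
--             return 'Вводимые значения должны быть числа'
--         if measurement == 'eye_response' or measurement == 'verbal_response' or measurement == 'motor_response':
--             gsc += user_data[measurement]
--         elif measurement == 'srad':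
--             n += user_data[measurement]
--         elif measurement in SOFA:
--             assesment = sofa_direction(user_data[measurement], SOFA[measurement]['scale'],
--                                        SOFA[measurement]['direction'])
--             n += assesment
--     return [n, gsc]
-- ===== SOURCE B (Python) =====
-- # Different decomposition: precomputed ascending boundary lists + hand-written binary
-- # search (bisect_left) instead of A's early-return linear scan over a reversed scale;
-- # GCS and SOFA totals computed as sums over comprehensions instead of one accumulator loop.
-- _ASC = {'platelets': [20, 50, 100, 150],
--         'pao2_fio2': [100, 200, 300, 400],
--         'gsc': [6, 9, 12, 14],
--         'creatinine': [110, 171, 300, 440],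
--         'bilirubin': [20, 33, 102, 204]}
-- _GCS = ('eye_response', 'verbal_response', 'motor_response')
--
--
-- def _bisect_left(asc, x):
--     lo, hi = 0, len(asc)
--     while lo < hi:
--         mid = (lo + hi) // 2
--         if asc[mid] < x:
--             lo = mid + 1
--         else:
--             hi = mid
--     return lo
--
--
-- def sofa(user_data):
--     vals = {k: int(v) for k, v in user_data.items()}
--     gsc = sum(v for k, v in vals.items() if k in _GCS)
--     n = sum(v if k == 'srad' else len(_ASC[k]) - _bisect_left(_ASC[k], v)
--             for k, v in vals.items() if k == 'srad' or k in _ASC)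
--     return [n, gsc]
-- ===== Notes on version B (the rewrite author's own statement) =====
-- stated objective: idiomatic
-- what changed: SOFA points come from a binary search (bisect_left) over precomputed ascending boundary lists instead of A's early-return linear scan of a per-call reversed scale, and the two totals are sums over comprehensions instead of a single accumulator loop with mutation of the input dict.
import Mathlib
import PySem

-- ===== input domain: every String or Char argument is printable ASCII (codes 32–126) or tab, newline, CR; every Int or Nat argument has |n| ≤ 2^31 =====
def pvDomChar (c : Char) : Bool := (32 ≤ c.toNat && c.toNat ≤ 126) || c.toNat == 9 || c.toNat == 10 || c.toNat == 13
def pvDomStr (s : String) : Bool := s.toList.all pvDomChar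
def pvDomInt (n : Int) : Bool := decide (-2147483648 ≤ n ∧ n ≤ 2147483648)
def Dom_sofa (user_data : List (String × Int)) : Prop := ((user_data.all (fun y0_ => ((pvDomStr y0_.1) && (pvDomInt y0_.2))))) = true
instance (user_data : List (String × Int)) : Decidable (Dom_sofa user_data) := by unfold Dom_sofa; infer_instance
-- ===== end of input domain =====

-- B replaces A's early-return linear scan over a reversed scale by a hand-written
-- binary search over precomputed ascending boundary lists, and computes the two totals
-- as sums over filtered lists instead of one accumulator loop (objective: idiomatic).
-- Equivalence is about the return value: A also re-stores int(v) into the input dict,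
-- a no-op on int values. On a dict of ints int() never raises TypeError, so A's
-- string-returning except branch is unreachable and both ports return List Int.

-- ===== PORT A =====
-- the module constant SOFA, as key -> (scale, direction)
def pvSOFA : PySem.Dict String (List Int × String) :=
  PySem.Dict.mk [("platelets", ([150, 100, 50, 20], "down")),
                 ("pao2_fio2", ([400, 300, 200, 100], "down")),
                 ("gsc", ([14, 12, 9, 6], "down")),
                 ("creatinine", ([110, 171, 300, 440], "up")),
                 ("bilirubin", ([20, 33, 102, 204], "up"))]

-- the 'for sofa_points, measure_border in enumerate(scale)' loop (i = running index)
def pvDirLoop (measure : Int) (i : Int) : List Int → Int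
  | [] => 4
  | b :: rest => if measure > b then 0 + i else pvDirLoop measure (i + 1) rest

def pvSofaDirection (measure : Int) (scale : List Int) (direction : String) : Int :=
  -- scale[::-1] is reversal (PySem.List.slice?_none_none_neg_one)
  let scale := if direction == "up" then scale.reverse else scale
  pvDirLoop measure 0 scale

-- the main for-loop; int(v) is the identity on an int value
def pvGo (n gsc : Int) : List (String × Int) → List Int
  | [] => [n, gsc]
  | (k, v) :: rest =>
    if k == "eye_response" || k == "verbal_response" || k == "motor_response" then
      pvGo n (gsc + v) rest
    else if k == "srad" then
      pvGo (n + v) gsc rest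
    else
      match pvSOFA.get? k with
      | some (scale, dir) => pvGo (n + pvSofaDirection v scale dir) gsc rest
      | none => pvGo n gsc rest

def sofa (user_data : List (String × Int)) : List Int := pvGo 0 0 user_data

-- ===== PORT B =====
def pvASC : PySem.Dict String (List Int) :=
  PySem.Dict.mk [("platelets", [20, 50, 100, 150]),
                 ("pao2_fio2", [100, 200, 300, 400]),
                 ("gsc", [6, 9, 12, 14]),
                 ("creatinine", [110, 171, 300, 440]),
                 ("bilirubin", [20, 33, 102, 204])]

def pvGCS : List String := ["eye_response", "verbal_response", "motor_response"]

-- the 'while lo < hi' loop of _bisect_left; fuel = hi - lo at entry bounds the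
-- iteration count (hi - lo shrinks every pass), making the recursion structural
def pvBisectGo (fuel : Nat) (asc : List Int) (x lo hi : Int) : Int :=
  match fuel with
  | 0 => lo
  | fuel + 1 =>
    if lo < hi then
      let mid := PySem.Int.floordiv (lo + hi) 2
      match PySem.List.pyGet? asc mid with
      | some b => if b < x then pvBisectGo fuel asc x (mid + 1) hi else pvBisectGo fuel asc x lo mid
      | none => lo   -- unreachable: every call keeps 0 ≤ lo ≤ mid < hi ≤ len asc
    else lo

def pvBisectLeft (asc : List Int) (x : Int) : Int := pvBisectGo (asc.length + 1) asc x 0 (asc.length : Int)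

-- the term of B's n-comprehension
def pvNContrib (p : String × Int) : Int :=
  if p.1 == "srad" then p.2
  else match pvASC.get? p.1 with
       | some asc => (asc.length : Int) - pvBisectLeft asc p.2
       | none => 0   -- unreachable: guarded by the comprehension's filter

def sofa_alt (user_data : List (String × Int)) : List Int :=
  -- {k: int(v) …} : int() is the identity on ints, keys of a dict are already distinct
  let vals := user_data
  let gsc := ((vals.filter (fun p => pvGCS.contains p.1)).map (fun p => p.2)).sum
  let n := ((vals.filter (fun p => p.1 == "srad" || (pvASC.get? p.1).isSome)).map pvNContrib).sum
  [n, gsc]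

-- ===== PRECONDITION & SPEC =====
def Spec_sofa (user_data : List (String × Int)) (out : List Int) : Prop := out = sofa_alt user_data
instance (user_data : List (String × Int)) (out : List Int) : Decidable (Spec_sofa user_data out) := by unfold Spec_sofa; infer_instance

-- ===== CLAIM (what is proved, stated in full; the proofs are below) =====
def Claim_equal_sofa : Prop := ∀ (user_data : List (String × Int)), Dom_sofa user_data → Spec_sofa user_data (sofa user_data)

-- ===== LEMMAS AND PROOFS =====

theorem pvBase (fuel : Nat) (asc : List Int) (x lo hi : Int) (h : ¬ lo < hi) :
    pvBisectGo (fuel + 1) asc x lo hi = lo := by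
  simp only [pvBisectGo, if_neg h]

theorem pvStep (fuel : Nat) (asc : List Int) (x lo hi mid b : Int) (h : lo < hi)
    (hm : PySem.Int.floordiv (lo + hi) 2 = mid) (hg : PySem.List.pyGet? asc mid = some b) :
    pvBisectGo (fuel + 1) asc x lo hi =
      if b < x then pvBisectGo fuel asc x (mid + 1) hi else pvBisectGo fuel asc x lo mid := by
  simp only [pvBisectGo, if_pos h, hm, hg]

-- the binary search on a four-element list, fully unfolded
theorem pvBisect4 (a b c d x : Int) :
    pvBisectGo 5 [a, b, c, d] x 0 4 =
      if c < x then (if d < x then 4 else 3)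
      else (if b < x then 2 else if a < x then 1 else 0) := by
  rw [pvStep 4 [a,b,c,d] x 0 4 2 c (by decide) (by decide)
      (by simp [PySem.List.pyGet?, PySem.List.pyIdx?])]
  by_cases hc : c < x
  · simp only [if_pos hc]
    norm_num only
    rw [pvStep 3 [a,b,c,d] x 3 4 3 d (by decide) (by decide)
        (by simp [PySem.List.pyGet?, PySem.List.pyIdx?])]
    by_cases hd : d < x
    · simp only [if_pos hd]; rw [pvBase _ _ _ _ _ (by norm_num)]; norm_num
    · simp only [if_neg hd]; rw [pvBase _ _ _ _ _ (by norm_num)]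
  · simp only [if_neg hc]
    rw [pvStep 3 [a,b,c,d] x 0 2 1 b (by decide) (by decide)
        (by simp [PySem.List.pyGet?, PySem.List.pyIdx?])]
    by_cases hb : b < x
    · simp only [if_pos hb]; rw [pvBase _ _ _ _ _ (by norm_num)]; norm_num
    · simp only [if_neg hb]
      rw [pvStep 2 [a,b,c,d] x 0 1 0 a (by decide) (by decide)
          (by simp [PySem.List.pyGet?, PySem.List.pyIdx?])]
      by_cases ha : a < x
      · simp only [if_pos ha]; rw [pvBase _ _ _ _ _ (by norm_num)]; norm_num
      · simp only [if_neg ha]; rw [pvBase _ _ _ _ _ (by norm_num)]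

theorem pvGetNil {v : Type} (k : String) :
    (PySem.Dict.mk ([] : List (String × v))).get? k = none := by
  simp [PySem.Dict.get?]

-- B's per-item n- and gsc-contributions, named for the induction
def pvNOf (l : List (String × Int)) : Int :=
  ((l.filter (fun p => p.1 == "srad" || (pvASC.get? p.1).isSome)).map pvNContrib).sum
def pvGOf (l : List (String × Int)) : Int :=
  ((l.filter (fun p => pvGCS.contains p.1)).map (fun p => p.2)).sum

theorem pvGo_eq (l : List (String × Int)) :
    ∀ n g : Int, pvGo n g l = [n + pvNOf l, g + pvGOf l] := by
  induction l with
  | nil => intro n g; simp [pvGo, pvNOf, pvGOf]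
  | cons p rest ih =>
    obtain ⟨k, v⟩ := p
    intro n g
    by_cases h1 : k = "eye_response"
    · subst h1
      simp [pvGo, pvNOf, pvGOf, ih, pvGCS, pvASC, PySem.Dict.get?_mk_cons, pvGetNil, List.filter_cons,
        add_assoc, add_comm, add_left_comm]
    · by_cases h2 : k = "verbal_response"
      · subst h2
        simp [pvGo, pvNOf, pvGOf, ih, pvGCS, pvASC, PySem.Dict.get?_mk_cons, pvGetNil, List.filter_cons,
          add_assoc, add_comm, add_left_comm]
      · by_cases h3 : k = "motor_response"
        · subst h3
          simp [pvGo, pvNOf, pvGOf, ih, pvGCS, pvASC, PySem.Dict.get?_mk_cons, pvGetNil, List.filter_cons,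
            add_assoc, add_comm, add_left_comm]
        · by_cases h4 : k = "srad"
          · subst h4
            simp [pvGo, pvNOf, pvGOf, ih, pvGCS, pvNContrib, pvASC,
              PySem.Dict.get?_mk_cons, add_assoc, add_comm, add_left_comm]
          · by_cases h5 : k = "platelets"
            · subst h5
              simp [pvGo, pvNOf, pvGOf, ih, pvGCS, pvNContrib, pvASC, pvSOFA,
                PySem.Dict.get?_mk_cons, pvSofaDirection, pvDirLoop, pvBisectLeft, pvBisect4,
                add_assoc, add_comm, add_left_comm]
              split_ifs <;> omega
            · by_cases h6 : k = "pao2_fio2"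
              · subst h6
                simp [pvGo, pvNOf, pvGOf, ih, pvGCS, pvNContrib, pvASC, pvSOFA,
                  PySem.Dict.get?_mk_cons, pvSofaDirection, pvDirLoop, pvBisectLeft, pvBisect4,
                  add_assoc, add_comm, add_left_comm]
                split_ifs <;> omega
              · by_cases h7 : k = "gsc"
                · subst h7
                  simp [pvGo, pvNOf, pvGOf, ih, pvGCS, pvNContrib, pvASC, pvSOFA,
                    PySem.Dict.get?_mk_cons, pvSofaDirection, pvDirLoop, pvBisectLeft, pvBisect4,
                    add_assoc, add_comm, add_left_comm]
                  split_ifs <;> omega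
                · by_cases h8 : k = "creatinine"
                  · subst h8
                    simp [pvGo, pvNOf, pvGOf, ih, pvGCS, pvNContrib, pvASC, pvSOFA,
                      PySem.Dict.get?_mk_cons, pvSofaDirection, pvDirLoop, pvBisectLeft, pvBisect4,
                      add_assoc, add_comm, add_left_comm]
                    split_ifs <;> omega
                  · by_cases h9 : k = "bilirubin"
                    · subst h9
                      simp [pvGo, pvNOf, pvGOf, ih, pvGCS, pvNContrib, pvASC, pvSOFA,
                        PySem.Dict.get?_mk_cons, pvSofaDirection, pvDirLoop, pvBisectLeft, pvBisect4,
                        add_assoc, add_comm, add_left_comm]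
                      split_ifs <;> omega
                    · simp [pvGo, pvNOf, pvGOf, ih, pvGCS, pvASC, pvSOFA, pvGetNil,
                        PySem.Dict.get?_mk_cons, h1, h2, h3, h4, h5, h6, h7, h8, h9,
                        Ne.symm h1, Ne.symm h2, Ne.symm h3, Ne.symm h4, Ne.symm h5,
                        Ne.symm h6, Ne.symm h7, Ne.symm h8, Ne.symm h9]

-- ===== VERDICT (by name: the statement is the Claim_ definition above) =====
theorem sofa_spec : Claim_equal_sofa := by
  intro ud _
  unfold Spec_sofa sofa sofa_alt
  rw [pvGo_eq]
  simp [pvNOf, pvGOf]
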